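-- pv_equiv track=rewrite | github.com/Rai220/anima | generation_7/tools/qr.py | render_terminal
-- ===== SOURCE A (Python) =====
-- def render_terminal(matrix):
--     """Render QR code to terminal using Unicode blocks."""
--     size = len(matrix)
--     # Add quiet zone
--     q = 2
--     lines = []
--
--     for r in range(0, size + q * 2, 2):
--         line = []
--         for c in range(size + q * 2):
--             r1 = r - q
--             r2 = r1 + 1
--             c1 = c - q
--
--             top = matrix[r1][c1] if 0 <= r1 < size and 0 <= c1 < size else 0
--             bot = matrix[r2][c1] if 0 <= r2 < size and 0 <= c1 < size else 0
--
--             if top and bot: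
--                 line.append('█')
--             elif top:
--                 line.append('▀')
--             elif bot:
--                 line.append('▄')
--             else:
--                 line.append(' ')
--
--         lines.append(''.join(line))
--
--     return '\n'.join(lines)
-- ===== SOURCE B (Python) =====
-- def render_terminal(matrix):
--     """Render QR code to terminal using Unicode blocks."""
--     size = len(matrix)
--     q = 2
--     w = size + 2 * q
--     h = (size + 2 * q + 1) // 2  # number of text lines (ceil of padded height / 2)
--     canvas = [[0] * w for _ in range(h)]
--     # stamp each dark module onto the blank canvas: bit 0 = top half, bit 1 = bottom half
--     for r in range(size):
--         for c in range(size):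
--             if matrix[r][c]:
--                 canvas[(r + q) // 2][c + q] |= 1 << ((r + q) % 2)
--     glyphs = ' ▀▄█'
--     return '\n'.join(''.join(glyphs[m] for m in line) for line in canvas)
-- ===== Notes on version B (the rewrite author's own statement) =====
-- stated objective: alternative
-- what changed: B inverts the data flow: instead of A's pull-rendering (scan every padded output cell two rows at a time and look each half up in the matrix with bounds checks), B starts from a blank canvas of per-character bitmasks and makes one pass over the input matrix, stamping each dark module onto its canvas cell (bit 0 = top half, bit 1 = bottom half), then maps masks to glyphs.
import Mathlib
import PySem

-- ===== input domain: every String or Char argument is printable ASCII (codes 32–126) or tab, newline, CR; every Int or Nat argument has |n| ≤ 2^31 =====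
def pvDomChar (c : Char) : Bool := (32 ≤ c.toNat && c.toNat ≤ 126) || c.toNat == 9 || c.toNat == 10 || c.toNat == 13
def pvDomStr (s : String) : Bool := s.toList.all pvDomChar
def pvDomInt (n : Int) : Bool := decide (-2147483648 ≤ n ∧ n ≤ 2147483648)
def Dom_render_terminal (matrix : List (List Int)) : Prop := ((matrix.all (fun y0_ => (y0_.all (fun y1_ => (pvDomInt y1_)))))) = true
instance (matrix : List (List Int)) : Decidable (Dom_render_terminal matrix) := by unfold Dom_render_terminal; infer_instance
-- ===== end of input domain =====

-- B inverts the data flow: one pass over the input matrix stamping each dark module (as a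
-- half-block bit) onto a blank canvas of bitmasks, instead of A's bounds-checked lookup of
-- every output cell; objective: alternative.

-- ===== PORT A =====
def render_terminal (matrix : List (List Int)) : String :=
  let size : Int := matrix.length
  let q : Int := 2
  let lines : List String :=
    (PySem.List.pyRange 0 (size + q * 2) 2).foldl (fun lines r =>
      let line : List Char :=
        (PySem.List.pyRange 0 (size + q * 2) 1).foldl (fun line c =>
          let r1 := r - q
          let r2 := r1 + 1
          let c1 := c - q
          -- matrix[r1][c1] under the guard; the pyGetD defaults are unreachable under Pre_
          let top : Int := if 0 ≤ r1 ∧ r1 < size ∧ 0 ≤ c1 ∧ c1 < size then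
              PySem.List.pyGetD (PySem.List.pyGetD matrix r1 []) c1 0 else 0
          let bot : Int := if 0 ≤ r2 ∧ r2 < size ∧ 0 ≤ c1 ∧ c1 < size then
              PySem.List.pyGetD (PySem.List.pyGetD matrix r2 []) c1 0 else 0
          if top ≠ 0 ∧ bot ≠ 0 then line ++ ['█']
          else if top ≠ 0 then line ++ ['▀']
          else if bot ≠ 0 then line ++ ['▄']
          else line ++ [' ']) []
      lines ++ [String.ofList line]) []
  PySem.Str.join "\n" lines

-- ===== PORT B =====
-- range(size) indices are 0,1,2,…, so Nat indices are exact; matrix[r] with 0 ≤ r < len never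
-- raises (pyGetD default unreachable); matrix[r][c] raises on ragged rows — excluded by Pre_.
def render_terminal_alt (matrix : List (List Int)) : String :=
  let size : Nat := matrix.length
  let w : Nat := size + 2 * 2
  let h : Nat := (size + 2 * 2 + 1) / 2
  let canvas : List (List Nat) :=
    (List.range size).foldl (fun (canvas : List (List Nat)) (r : Nat) =>
      (List.range size).foldl (fun (canvas : List (List Nat)) (c : Nat) =>
        if PySem.List.pyGetD (PySem.List.pyGetD matrix (r : Int) []) (c : Int) 0 ≠ 0 then
          canvas.modify ((r + 2) / 2)
            (fun line => line.modify (c + 2) (fun m => m ||| 1 <<< ((r + 2) % 2)))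
        else canvas) canvas)
      (List.replicate h (List.replicate w 0))
  PySem.Str.join "\n" (canvas.map (fun line =>
    String.ofList (line.map (fun m => [' ', '▀', '▄', '█'].getD m ' '))))

-- ===== PRECONDITION & SPEC =====
-- Pre_ excludes exactly the ragged matrices with some row shorter than len(matrix):
-- there A raises IndexError (matrix[r1][c1] past the row's end).
def Pre_render_terminal (matrix : List (List Int)) : Prop :=
  ∀ row ∈ matrix, matrix.length ≤ row.length
instance (matrix : List (List Int)) : Decidable (Pre_render_terminal matrix) := by
  unfold Pre_render_terminal; infer_instance
def pvWitness_render_terminal : List (List Int) := [[1, 0], [0, 1]]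

def Spec_render_terminal (matrix : List (List Int)) (out : String) : Prop := out = render_terminal_alt matrix
instance (matrix : List (List Int)) (out : String) : Decidable (Spec_render_terminal matrix out) := by unfold Spec_render_terminal; infer_instance

-- ===== CLAIM (what is proved, stated in full; the proofs are below) =====
def Claim_equal_render_terminal : Prop := ∀ (matrix : List (List Int)), Dom_render_terminal matrix → Pre_render_terminal matrix → Spec_render_terminal matrix (render_terminal matrix)

-- ===== LEMMAS AND PROOFS =====

-- the guarded cell lookup A realises: quiet zone / out of range ↦ 0
def pvCell (matrix : List (List Int)) (r c : Int) : Int :=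
  if 0 ≤ r - 2 ∧ r - 2 < (matrix.length : Int) ∧ 0 ≤ c - 2 ∧ c - 2 < (matrix.length : Int) then
    PySem.List.pyGetD (PySem.List.pyGetD matrix (r - 2) []) (c - 2) 0 else 0

def pvGlyph (t b : Int) : Char :=
  if t ≠ 0 ∧ b ≠ 0 then '█' else if t ≠ 0 then '▀' else if b ≠ 0 then '▄' else ' '

-- A's result in pull normal form: one glyph per (line, column) from the two guarded lookups
lemma pvA_normal (matrix : List (List Int)) :
    render_terminal matrix =
      PySem.Str.join "\n"
        ((PySem.List.pyRange 0 ((matrix.length : Int) + 2 * 2) 2).map (fun r =>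
          String.ofList ((List.range (matrix.length + 4)).map (fun (c : Nat) =>
            pvGlyph (pvCell matrix r (c : Int)) (pvCell matrix (r + 1) (c : Int)))))) := by
  unfold render_terminal
  simp only []
  congr 1
  have hline : ∀ r : Int,
      (PySem.List.pyRange 0 ((matrix.length : Int) + 2 * 2) 1).foldl (fun line c =>
          let r1 := r - 2
          let r2 := r1 + 1
          let c1 := c - 2
          let top : Int := if 0 ≤ r1 ∧ r1 < (matrix.length : Int) ∧ 0 ≤ c1 ∧ c1 < (matrix.length : Int) then
              PySem.List.pyGetD (PySem.List.pyGetD matrix r1 []) c1 0 else 0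
          let bot : Int := if 0 ≤ r2 ∧ r2 < (matrix.length : Int) ∧ 0 ≤ c1 ∧ c1 < (matrix.length : Int) then
              PySem.List.pyGetD (PySem.List.pyGetD matrix r2 []) c1 0 else 0
          if top ≠ 0 ∧ bot ≠ 0 then line ++ ['█']
          else if top ≠ 0 then line ++ ['▀']
          else if bot ≠ 0 then line ++ ['▄']
          else line ++ [' ']) []
      = (List.range (matrix.length + 4)).map (fun (c : Nat) => pvCell matrix r (c : Int) |> pvGlyph <| pvCell matrix (r + 1) (c : Int)) := by
    intro r
    have hb : (fun (line : List Char) (c : Int) =>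
          let r1 := r - 2
          let r2 := r1 + 1
          let c1 := c - 2
          let top : Int := if 0 ≤ r1 ∧ r1 < (matrix.length : Int) ∧ 0 ≤ c1 ∧ c1 < (matrix.length : Int) then
              PySem.List.pyGetD (PySem.List.pyGetD matrix r1 []) c1 0 else 0
          let bot : Int := if 0 ≤ r2 ∧ r2 < (matrix.length : Int) ∧ 0 ≤ c1 ∧ c1 < (matrix.length : Int) then
              PySem.List.pyGetD (PySem.List.pyGetD matrix r2 []) c1 0 else 0
          if top ≠ 0 ∧ bot ≠ 0 then line ++ ['█']
          else if top ≠ 0 then line ++ ['▀']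
          else if bot ≠ 0 then line ++ ['▄']
          else line ++ [' '])
        = fun line c => line ++ [pvGlyph (pvCell matrix r c) (pvCell matrix (r + 1) c)] := by
      funext line c
      simp only [pvCell, pvGlyph]
      rw [show r - 2 + 1 = r + 1 - 2 by ring]
      split_ifs <;> rfl
    rw [hb, PySem.List.foldl_append_singleton_eq_map, PySem.List.pyRange_one]
    rw [show ((matrix.length : Int) + 2 * 2 - 0).toNat = matrix.length + 4 from by omega]
    simp [List.map_map, Function.comp_def]
  simp only [hline]
  rw [PySem.List.foldl_append_singleton_eq_map]
  simp

-- ------- B-side theory: the stamping fold, characterised pointwise -------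

-- entry (i, j) of the canvas, default 0
def pvGet2 (C : List (List Nat)) (i j : Nat) : Nat := (C.getD i []).getD j 0

def pvLine (r : Nat) : Nat := (r + 2) / 2
def pvBit (r : Nat) : Nat := 1 <<< ((r + 2) % 2)

-- bits contributed by n cells of one row (column indices from c0, row index r)
def pvColBitsR (row : List Int) (n c0 r i j : Nat) : Nat :=
  match n with
  | 0 => 0
  | Nat.succ m =>
      (if row.getD c0 0 ≠ 0 ∧ i = pvLine r ∧ j = c0 + 2 then pvBit r else 0)
        ||| pvColBitsR row m (c0 + 1) r i j

-- bits contributed by n rows (row indices from r0), each scanning size cells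
def pvRowBitsR (matrix : List (List Int)) (size n r0 i j : Nat) : Nat :=
  match n with
  | 0 => 0
  | Nat.succ m =>
      pvColBitsR (matrix.getD r0 []) size 0 r0 i j ||| pvRowBitsR matrix size m (r0 + 1) i j

-- the bit the (single) module of padded row p, column j contributes
def pvHitR (matrix : List (List Int)) (size n r0 p j : Nat) : Nat :=
  if r0 + 2 ≤ p ∧ p < r0 + 2 + n ∧ 2 ≤ j ∧ j < 2 + size ∧
     (matrix.getD (p - 2) []).getD (j - 2) 0 ≠ 0
  then 1 <<< (p % 2) else 0

lemma pvGet2_stamp (C : List (List Nat)) (r c : Nat) (g : Nat → Nat) (i j : Nat)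
    (hc : c < (C.getD r []).length) :
    pvGet2 (C.modify r (fun line => line.modify c g)) i j
      = if i = r ∧ j = c then g (pvGet2 C i j) else pvGet2 C i j := by
  unfold pvGet2
  have h1 : (C.modify r (fun line => line.modify c g)).getD i []
      = if r = i then (C.getD i []).modify c g else C.getD i [] := by
    rw [List.getD_eq_getElem?_getD, List.getElem?_modify, List.getD_eq_getElem?_getD]
    cases h : C[i]? <;> split <;> simp
  rw [h1]
  by_cases hi : r = i
  · rw [if_pos hi]
    subst hi
    have h2 : ∀ (L : List Nat), c < L.length →
        (L.modify c g).getD j 0 = if c = j then g (L.getD j 0) else L.getD j 0 := by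
      intro L hcL
      rw [List.getD_eq_getElem?_getD, List.getElem?_modify, List.getD_eq_getElem?_getD]
      cases h : L[j]?
      · by_cases hj : c = j
        · exfalso
          rw [List.getElem?_eq_none_iff] at h
          omega
        · simp [hj]
      · by_cases hj : c = j <;> simp [hj]
    rw [h2 (C.getD r []) hc]
    by_cases hj : j = c
    · rw [if_pos hj.symm, if_pos ⟨rfl, hj⟩]
    · rw [if_neg (fun hh => hj hh.symm), if_neg (fun hh => hj hh.2)]
  · rw [if_neg hi, if_neg (fun hh => hi hh.1.symm)]

lemma pvShape_stamp (C : List (List Nat)) (r c : Nat) (g : Nat → Nat) :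
    (C.modify r (fun line => line.modify c g)).length = C.length ∧
    ∀ k, ((C.modify r (fun line => line.modify c g)).getD k []).length = (C.getD k []).length := by
  refine ⟨List.length_modify _ _ _, fun k => ?_⟩
  rw [List.getD_eq_getElem?_getD, List.getElem?_modify, List.getD_eq_getElem?_getD]
  cases h : C[k]? <;> split <;> simp [List.length_modify]

-- the inner fold of B's port (over one row's n cells): shape kept, entries OR-accumulated
lemma pvInnerR (r0 : Nat) (row : List Int) (n : Nat) : ∀ (c0 : Nat) (C : List (List Nat)),
    ((List.range' c0 n).foldl (fun (canvas : List (List Nat)) (c : Nat) =>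
        if PySem.List.pyGetD row (c : Int) 0 ≠ 0 then
          canvas.modify ((r0 + 2) / 2)
            (fun line => line.modify (c + 2) (fun m => m ||| 1 <<< ((r0 + 2) % 2)))
        else canvas) C).length = C.length ∧
    (∀ k, (((List.range' c0 n).foldl (fun (canvas : List (List Nat)) (c : Nat) =>
        if PySem.List.pyGetD row (c : Int) 0 ≠ 0 then
          canvas.modify ((r0 + 2) / 2)
            (fun line => line.modify (c + 2) (fun m => m ||| 1 <<< ((r0 + 2) % 2)))
        else canvas) C).getD k []).length = (C.getD k []).length) ∧
    (pvLine r0 < C.length → c0 + n + 2 ≤ (C.getD (pvLine r0) []).length →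
      ∀ i j, pvGet2 ((List.range' c0 n).foldl (fun (canvas : List (List Nat)) (c : Nat) =>
        if PySem.List.pyGetD row (c : Int) 0 ≠ 0 then
          canvas.modify ((r0 + 2) / 2)
            (fun line => line.modify (c + 2) (fun m => m ||| 1 <<< ((r0 + 2) % 2)))
        else canvas) C) i j = pvGet2 C i j ||| pvColBitsR row n c0 r0 i j) := by
  induction n with
  | zero => intro c0 C; simp [pvColBitsR]
  | succ m ih =>
    intro c0 C
    rw [List.range'_succ]
    simp only [List.foldl_cons]
    have hpy : PySem.List.pyGetD row ((c0 : Nat) : Int) 0 = row.getD c0 0 := by simp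
    obtain ⟨ihlen, ihwid, ihget⟩ := ih (c0 + 1)
      (if PySem.List.pyGetD row ((c0 : Nat) : Int) 0 ≠ 0 then
          C.modify ((r0 + 2) / 2)
            (fun line => line.modify (c0 + 2) (fun m => m ||| 1 <<< ((r0 + 2) % 2)))
        else C)
    have hshape : (if PySem.List.pyGetD row ((c0 : Nat) : Int) 0 ≠ 0 then
          C.modify ((r0 + 2) / 2)
            (fun line => line.modify (c0 + 2) (fun m => m ||| 1 <<< ((r0 + 2) % 2)))
        else C).length = C.length ∧
        ∀ k, ((if PySem.List.pyGetD row ((c0 : Nat) : Int) 0 ≠ 0 then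
          C.modify ((r0 + 2) / 2)
            (fun line => line.modify (c0 + 2) (fun m => m ||| 1 <<< ((r0 + 2) % 2)))
        else C).getD k []).length = (C.getD k []).length := by
      split
      · exact pvShape_stamp C _ _ _
      · exact ⟨rfl, fun _ => rfl⟩
    refine ⟨ihlen.trans hshape.1, fun k => (ihwid k).trans (hshape.2 k), ?_⟩
    intro hL hW i j
    have hL' : pvLine r0 < (if PySem.List.pyGetD row ((c0 : Nat) : Int) 0 ≠ 0 then
          C.modify ((r0 + 2) / 2)
            (fun line => line.modify (c0 + 2) (fun m => m ||| 1 <<< ((r0 + 2) % 2)))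
        else C).length := hshape.1 ▸ hL
    have hW' : (c0 + 1) + m + 2 ≤ ((if PySem.List.pyGetD row ((c0 : Nat) : Int) 0 ≠ 0 then
          C.modify ((r0 + 2) / 2)
            (fun line => line.modify (c0 + 2) (fun m => m ||| 1 <<< ((r0 + 2) % 2)))
        else C).getD (pvLine r0) []).length := by
      rw [hshape.2]
      omega
    rw [ihget hL' hW' i j]
    have hstep : pvGet2 (if PySem.List.pyGetD row ((c0 : Nat) : Int) 0 ≠ 0 then
          C.modify ((r0 + 2) / 2)
            (fun line => line.modify (c0 + 2) (fun m => m ||| 1 <<< ((r0 + 2) % 2)))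
        else C) i j
        = if row.getD c0 0 ≠ 0 ∧ i = pvLine r0 ∧ j = c0 + 2
          then pvGet2 C i j ||| pvBit r0 else pvGet2 C i j := by
      by_cases hv : row.getD c0 0 ≠ 0
      · rw [if_pos (hpy.symm ▸ hv)]
        have hs := pvGet2_stamp C (pvLine r0) (c0 + 2) (fun m => m ||| 1 <<< ((r0 + 2) % 2)) i j
          (by omega)
        simp only [pvLine] at hs
        rw [hs]
        by_cases h1 : i = (r0 + 2) / 2 ∧ j = c0 + 2
        · rw [if_pos h1, if_pos ⟨hv, by simpa [pvLine] using h1.1, h1.2⟩]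
          rfl
        · rw [if_neg h1, if_neg (by simp only [pvLine]; tauto)]
      · rw [if_neg (fun hh => hv (hpy ▸ hh)), if_neg (by tauto)]
    rw [hstep]
    show _ = pvGet2 C i j |||
      ((if row.getD c0 0 ≠ 0 ∧ i = pvLine r0 ∧ j = c0 + 2 then pvBit r0 else 0)
        ||| pvColBitsR row m (c0 + 1) r0 i j)
    split_ifs with h
    · rw [Nat.or_assoc]
    · rw [Nat.zero_or]

-- the outer fold of B's port (over n rows)
lemma pvOuterR (matrix : List (List Int)) (size : Nat) (n : Nat) : ∀ (r0 : Nat) (C : List (List Nat)),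
    r0 + n ≤ size →
    C.length = (size + 2 * 2 + 1) / 2 →
    (∀ k, k < C.length → (C.getD k []).length = size + 2 * 2) →
    ((List.range' r0 n).foldl (fun (canvas : List (List Nat)) (r : Nat) =>
        (List.range size).foldl (fun (canvas : List (List Nat)) (c : Nat) =>
          if PySem.List.pyGetD (PySem.List.pyGetD matrix (r : Int) []) (c : Int) 0 ≠ 0 then
            canvas.modify ((r + 2) / 2)
              (fun line => line.modify (c + 2) (fun m => m ||| 1 <<< ((r + 2) % 2)))
          else canvas) canvas) C).length = C.length ∧
    (∀ k, (((List.range' r0 n).foldl (fun (canvas : List (List Nat)) (r : Nat) =>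
        (List.range size).foldl (fun (canvas : List (List Nat)) (c : Nat) =>
          if PySem.List.pyGetD (PySem.List.pyGetD matrix (r : Int) []) (c : Int) 0 ≠ 0 then
            canvas.modify ((r + 2) / 2)
              (fun line => line.modify (c + 2) (fun m => m ||| 1 <<< ((r + 2) % 2)))
          else canvas) canvas) C).getD k []).length = (C.getD k []).length) ∧
    (∀ i j, pvGet2 ((List.range' r0 n).foldl (fun (canvas : List (List Nat)) (r : Nat) =>
        (List.range size).foldl (fun (canvas : List (List Nat)) (c : Nat) =>
          if PySem.List.pyGetD (PySem.List.pyGetD matrix (r : Int) []) (c : Int) 0 ≠ 0 then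
            canvas.modify ((r + 2) / 2)
              (fun line => line.modify (c + 2) (fun m => m ||| 1 <<< ((r + 2) % 2)))
          else canvas) canvas) C) i j
      = pvGet2 C i j ||| pvRowBitsR matrix size n r0 i j) := by
  induction n with
  | zero => intro r0 C _ _ _; simp [pvRowBitsR]
  | succ m ih =>
    intro r0 C hr0 hlen hwid
    rw [List.range'_succ]
    simp only [List.foldl_cons]
    have hL : pvLine r0 < C.length := by
      simp only [pvLine, hlen]
      omega
    have hW : 0 + size + 2 ≤ (C.getD (pvLine r0) []).length := by
      rw [hwid _ hL]
      omega
    have hrow : PySem.List.pyGetD matrix ((r0 : Nat) : Int) [] = matrix.getD r0 [] := by simp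
    obtain ⟨ilen, iwid, iget⟩ := pvInnerR r0 (PySem.List.pyGetD matrix ((r0 : Nat) : Int) []) size 0 C
    rw [← List.range_eq_range'] at ilen iwid iget
    obtain ⟨olen, owid, oget⟩ := ih (r0 + 1)
      ((List.range size).foldl (fun (canvas : List (List Nat)) (c : Nat) =>
          if PySem.List.pyGetD (PySem.List.pyGetD matrix ((r0 : Nat) : Int) []) (c : Int) 0 ≠ 0 then
            canvas.modify ((r0 + 2) / 2)
              (fun line => line.modify (c + 2) (fun m => m ||| 1 <<< ((r0 + 2) % 2)))
          else canvas) C)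
      (by omega)
      (by rw [ilen, hlen])
      (fun k hk => by rw [iwid k]; exact hwid k (ilen ▸ hk))
    refine ⟨olen.trans ilen, fun k => (owid k).trans (iwid k), ?_⟩
    intro i j
    rw [oget i j, iget hL hW i j, hrow]
    show _ = pvGet2 C i j |||
      (pvColBitsR (matrix.getD r0 []) size 0 r0 i j ||| pvRowBitsR matrix size m (r0 + 1) i j)
    rw [Nat.or_assoc]

-- evaluating pvColBitsR to a single guarded test
lemma pvColBitsR_eval (r0 : Nat) (row : List Int) (n : Nat) : ∀ (c0 i j : Nat),
    pvColBitsR row n c0 r0 i j =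
      if i = pvLine r0 ∧ c0 + 2 ≤ j ∧ j < c0 + 2 + n ∧ row.getD (j - 2) 0 ≠ 0
      then pvBit r0 else 0 := by
  induction n with
  | zero =>
    intro c0 i j
    simp only [pvColBitsR]
    rw [if_neg (show ¬(i = pvLine r0 ∧ c0 + 2 ≤ j ∧ j < c0 + 2 + 0 ∧ row.getD (j - 2) 0 ≠ 0)
      from by rintro ⟨-, h1, h2, -⟩; omega)]
  | succ m ih =>
    intro c0 i j
    simp only [pvColBitsR, ih (c0 + 1)]
    by_cases hj : j = c0 + 2
    · subst hj
      rw [if_neg (show ¬(i = pvLine r0 ∧ c0 + 1 + 2 ≤ c0 + 2 ∧ c0 + 2 < c0 + 1 + 2 + m ∧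
            row.getD (c0 + 2 - 2) 0 ≠ 0) from by rintro ⟨-, h1, -⟩; omega),
          Nat.or_zero,
          show c0 + 2 - 2 = c0 from by omega]
      exact if_congr
        ⟨fun h => ⟨h.2.1, le_refl _, by omega, h.1⟩, fun h => ⟨h.2.2.2, h.1, by trivial⟩⟩ rfl rfl
    · rw [if_neg (show ¬(row.getD c0 0 ≠ 0 ∧ i = pvLine r0 ∧ j = c0 + 2) from by tauto),
          Nat.zero_or]
      exact if_congr
        ⟨fun h => ⟨h.1, by omega, by omega, h.2.2.2⟩,
         fun h => ⟨h.1, by omega, by omega, h.2.2.2⟩⟩ rfl rfl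

lemma pvHitR_lt (matrix : List (List Int)) (size n r0 p j : Nat) (h : p < r0 + 2) :
    pvHitR matrix size n r0 p j = 0 := by
  unfold pvHitR
  rw [if_neg (show ¬(r0 + 2 ≤ p ∧ p < r0 + 2 + n ∧ 2 ≤ j ∧ j < 2 + size ∧
      (matrix.getD (p - 2) []).getD (j - 2) 0 ≠ 0) from by rintro ⟨h1, -⟩; omega)]

lemma pvHitR_succ (matrix : List (List Int)) (size m r0 p j : Nat) :
    pvHitR matrix size (m + 1) r0 p j =
      if p = r0 + 2 ∧ 2 ≤ j ∧ j < 2 + size ∧ (matrix.getD r0 []).getD (j - 2) 0 ≠ 0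
      then 1 <<< (p % 2) else pvHitR matrix size m (r0 + 1) p j := by
  by_cases hp : p = r0 + 2
  · rw [pvHitR_lt matrix size m (r0 + 1) p j (by omega)]
    unfold pvHitR
    rw [show p - 2 = r0 from by omega]
    exact if_congr ⟨fun h => ⟨hp, h.2.2⟩, fun h => ⟨by omega, by omega, h.2⟩⟩ rfl rfl
  · rw [if_neg (show ¬(p = r0 + 2 ∧ 2 ≤ j ∧ j < 2 + size ∧
        (matrix.getD r0 []).getD (j - 2) 0 ≠ 0) from fun h => hp h.1)]
    unfold pvHitR
    exact if_congr
      ⟨fun h => ⟨by omega, by omega, h.2.2⟩, fun h => ⟨by omega, by omega, h.2.2⟩⟩ rfl rfl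

-- evaluating pvRowBitsR: only padded rows 2i (top bit) and 2i+1 (bottom bit) reach line i
lemma pvRowBitsR_eval (matrix : List (List Int)) (size : Nat) (n : Nat) : ∀ (r0 i j : Nat),
    pvRowBitsR matrix size n r0 i j =
      pvHitR matrix size n r0 (2 * i) j ||| pvHitR matrix size n r0 (2 * i + 1) j := by
  induction n with
  | zero =>
    intro r0 i j
    simp only [pvRowBitsR]
    unfold pvHitR
    rw [if_neg (show ¬(r0 + 2 ≤ 2 * i ∧ 2 * i < r0 + 2 + 0 ∧ 2 ≤ j ∧ j < 2 + size ∧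
          (matrix.getD (2 * i - 2) []).getD (j - 2) 0 ≠ 0) from by rintro ⟨h1, h2, -⟩; omega),
        if_neg (show ¬(r0 + 2 ≤ 2 * i + 1 ∧ 2 * i + 1 < r0 + 2 + 0 ∧ 2 ≤ j ∧ j < 2 + size ∧
          (matrix.getD (2 * i + 1 - 2) []).getD (j - 2) 0 ≠ 0) from by rintro ⟨h1, h2, -⟩; omega)]
    simp
  | succ m ih =>
    intro r0 i j
    simp only [pvRowBitsR, pvColBitsR_eval, ih (r0 + 1), pvHitR_succ, Nat.zero_add]
    by_cases hR : 2 ≤ j ∧ j < 2 + size ∧ (matrix.getD r0 []).getD (j - 2) 0 ≠ 0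
    · by_cases hA : 2 * i = r0 + 2
      · rw [if_pos ⟨by simp only [pvLine]; omega, hR.1, by omega, hR.2.2⟩,
            if_pos ⟨hA, hR⟩,
            if_neg (show ¬(2 * i + 1 = r0 + 2 ∧ 2 ≤ j ∧ j < 2 + size ∧
              (matrix.getD r0 []).getD (j - 2) 0 ≠ 0) from by rintro ⟨h1, -⟩; omega),
            pvHitR_lt matrix size m (r0 + 1) (2 * i) j (by omega)]
        rw [show pvBit r0 = 1 <<< (2 * i % 2) from by
          simp only [pvBit, show (r0 + 2) % 2 = 2 * i % 2 from by omega]]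
        rw [Nat.zero_or]
      · by_cases hB : 2 * i + 1 = r0 + 2
        · rw [if_pos ⟨by simp only [pvLine]; omega, hR.1, by omega, hR.2.2⟩,
              if_neg (show ¬(2 * i = r0 + 2 ∧ 2 ≤ j ∧ j < 2 + size ∧
                (matrix.getD r0 []).getD (j - 2) 0 ≠ 0) from by rintro ⟨h1, -⟩; omega),
              if_pos ⟨hB, hR⟩,
              pvHitR_lt matrix size m (r0 + 1) (2 * i) j (by omega),
              pvHitR_lt matrix size m (r0 + 1) (2 * i + 1) j (by omega)]
          rw [show pvBit r0 = 1 <<< ((2 * i + 1) % 2) from by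
            simp only [pvBit, show (r0 + 2) % 2 = (2 * i + 1) % 2 from by omega]]
          rw [Nat.or_zero, Nat.zero_or, Nat.or_zero]
        · rw [if_neg (show ¬(i = pvLine r0 ∧ 2 ≤ j ∧ j < 2 + size ∧
                (matrix.getD r0 []).getD (j - 2) 0 ≠ 0) from by
              rintro ⟨h1, -⟩; simp only [pvLine] at h1; omega),
              if_neg (show ¬(2 * i = r0 + 2 ∧ 2 ≤ j ∧ j < 2 + size ∧
                (matrix.getD r0 []).getD (j - 2) 0 ≠ 0) from by rintro ⟨h1, -⟩; omega),
              if_neg (show ¬(2 * i + 1 = r0 + 2 ∧ 2 ≤ j ∧ j < 2 + size ∧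
                (matrix.getD r0 []).getD (j - 2) 0 ≠ 0) from by rintro ⟨h1, -⟩; omega),
              Nat.zero_or]
    · rw [if_neg (show ¬(i = pvLine r0 ∧ 2 ≤ j ∧ j < 2 + size ∧
            (matrix.getD r0 []).getD (j - 2) 0 ≠ 0) from fun h => hR ⟨h.2.1, h.2.2.1, h.2.2.2⟩),
          if_neg (show ¬(2 * i = r0 + 2 ∧ 2 ≤ j ∧ j < 2 + size ∧
            (matrix.getD r0 []).getD (j - 2) 0 ≠ 0) from fun h => hR h.2),
          if_neg (show ¬(2 * i + 1 = r0 + 2 ∧ 2 ≤ j ∧ j < 2 + size ∧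
            (matrix.getD r0 []).getD (j - 2) 0 ≠ 0) from fun h => hR h.2),
          Nat.zero_or]

-- B's hit test agrees with A's guarded lookup pvCell
lemma pvHitR_cell (matrix : List (List Int)) (p j : Nat) :
    pvHitR matrix matrix.length matrix.length 0 p j
      = if pvCell matrix (p : Int) (j : Int) ≠ 0 then 1 <<< (p % 2) else 0 := by
  unfold pvHitR pvCell
  simp only [Nat.zero_add]
  by_cases hg : 2 ≤ p ∧ p < 2 + matrix.length ∧ 2 ≤ j ∧ j < 2 + matrix.length
  · have hInt : 0 ≤ (p : Int) - 2 ∧ (p : Int) - 2 < (matrix.length : Int) ∧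
        0 ≤ (j : Int) - 2 ∧ (j : Int) - 2 < (matrix.length : Int) := by omega
    rw [if_pos hInt,
        show (p : Int) - 2 = ((p - 2 : Nat) : Int) from by omega,
        show (j : Int) - 2 = ((j - 2 : Nat) : Int) from by omega,
        PySem.List.pyGetD_natCast, PySem.List.pyGetD_natCast]
    exact if_congr
      ⟨fun h => h.2.2.2.2, fun h => ⟨by omega, by omega, by omega, by omega, h⟩⟩ rfl rfl
  · have hneg : ¬(0 ≤ (p : Int) - 2 ∧ (p : Int) - 2 < (matrix.length : Int) ∧
        0 ≤ (j : Int) - 2 ∧ (j : Int) - 2 < (matrix.length : Int)) := by omega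
    rw [if_neg hneg, if_neg (show ¬((0 : Int) ≠ 0) from fun h => h rfl),
        if_neg (show ¬(2 ≤ p ∧ p < 2 + matrix.length ∧ 2 ≤ j ∧ j < 2 + matrix.length ∧
          (matrix.getD (p - 2) []).getD (j - 2) 0 ≠ 0) from
        fun h => hg ⟨h.1, h.2.1, h.2.2.1, h.2.2.2.1⟩)]

-- the full mask at line i, column j
lemma pvMask (matrix : List (List Int)) (i j : Nat) :
    pvRowBitsR matrix matrix.length matrix.length 0 i j
      = (if pvCell matrix ((2 * i : Nat) : Int) (j : Int) ≠ 0 then 1 else 0)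
        ||| (if pvCell matrix ((2 * i + 1 : Nat) : Int) (j : Int) ≠ 0 then 2 else 0) := by
  rw [pvRowBitsR_eval, pvHitR_cell, pvHitR_cell,
      show 2 * i % 2 = 0 from by omega,
      show (2 * i + 1) % 2 = 1 from by omega,
      show (1 <<< 0 : Nat) = 1 from rfl,
      show (1 <<< 1 : Nat) = 2 from rfl]

-- the 4-entry glyph table applied to the mask is A's branch cascade
lemma pvGlyph_mask (t b : Int) :
    [' ', '▀', '▄', '█'].getD
        ((if t ≠ 0 then (1 : Nat) else 0) ||| (if b ≠ 0 then (2 : Nat) else 0)) ' '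
      = pvGlyph t b := by
  unfold pvGlyph
  by_cases ht : t ≠ 0 <;> by_cases hb : b ≠ 0 <;> simp [ht, hb]

-- the blank canvas
lemma pvGet2_blank (h w i j : Nat) :
    pvGet2 (List.replicate h (List.replicate w (0 : Nat))) i j = 0 := by
  unfold pvGet2
  rcases Nat.lt_or_ge i h with hi | hi
  · have h1 : (List.replicate h (List.replicate w (0 : Nat))).getD i [] = List.replicate w 0 := by
      rw [List.getD_eq_getElem _ _ (by simpa using hi), List.getElem_replicate]
    rw [h1]
    rcases Nat.lt_or_ge j w with hj | hj
    · rw [List.getD_eq_getElem _ _ (by simpa using hj), List.getElem_replicate]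
    · rw [List.getD_eq_getElem?_getD, List.getElem?_eq_none (by simpa using hj)]
      rfl
  · have h1 : (List.replicate h (List.replicate w (0 : Nat))).getD i [] = [] := by
      rw [List.getD_eq_getElem?_getD, List.getElem?_eq_none (by simpa using hi)]
      rfl
    rw [h1]
    rfl

lemma pv_main (matrix : List (List Int)) :
    render_terminal matrix = render_terminal_alt matrix := by
  rw [pvA_normal]
  show _ = PySem.Str.join "\n"
    ((((List.range matrix.length).foldl (fun (canvas : List (List Nat)) (r : Nat) =>
      (List.range matrix.length).foldl (fun (canvas : List (List Nat)) (c : Nat) =>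
        if PySem.List.pyGetD (PySem.List.pyGetD matrix (r : Int) []) (c : Int) 0 ≠ 0 then
          canvas.modify ((r + 2) / 2)
            (fun line => line.modify (c + 2) (fun m => m ||| 1 <<< ((r + 2) % 2)))
        else canvas) canvas)
      (List.replicate ((matrix.length + 2 * 2 + 1) / 2) (List.replicate (matrix.length + 2 * 2) 0)))).map (fun line =>
      String.ofList (line.map (fun m => [' ', '▀', '▄', '█'].getD m ' '))))
  obtain ⟨hlen, hwid, hget⟩ := pvOuterR matrix matrix.length matrix.length 0
    (List.replicate ((matrix.length + 2 * 2 + 1) / 2) (List.replicate (matrix.length + 2 * 2) 0))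
    (by omega)
    (by rw [List.length_replicate])
    (fun k hk => by
      rw [List.length_replicate] at hk
      rw [List.getD_eq_getElem _ _ (by rwa [List.length_replicate]), List.getElem_replicate,
        List.length_replicate])
  rw [← List.range_eq_range'] at hlen hwid hget
  set canvas := ((List.range matrix.length).foldl (fun (canvas : List (List Nat)) (r : Nat) =>
      (List.range matrix.length).foldl (fun (canvas : List (List Nat)) (c : Nat) =>
        if PySem.List.pyGetD (PySem.List.pyGetD matrix (r : Int) []) (c : Int) 0 ≠ 0 then
          canvas.modify ((r + 2) / 2)
            (fun line => line.modify (c + 2) (fun m => m ||| 1 <<< ((r + 2) % 2)))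
        else canvas) canvas)
      (List.replicate ((matrix.length + 2 * 2 + 1) / 2) (List.replicate (matrix.length + 2 * 2) 0))) with hcanvas
  have hclen : canvas.length = (matrix.length + 2 * 2 + 1) / 2 := by
    rw [hcanvas, hlen, List.length_replicate]
  have hcwid : ∀ k, k < canvas.length → (canvas.getD k []).length = matrix.length + 2 * 2 := by
    intro k hk
    rw [hcanvas, hwid k, List.getD_eq_getElem _ _ (by rw [List.length_replicate]; rwa [hclen] at hk),
      List.getElem_replicate, List.length_replicate]
  have hcget : ∀ i j, pvGet2 canvas i j = pvRowBitsR matrix matrix.length matrix.length 0 i j := by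
    intro i j
    rw [hcanvas, hget i j, pvGet2_blank, Nat.zero_or]
  clear_value canvas
  clear hcanvas hlen hwid hget
  congr 1
  rw [PySem.List.pyRange_of_pos 0 ((matrix.length : Int) + 2 * 2) (by norm_num : (0 : Int) < 2)]
  rw [show (if (0 : Int) < (matrix.length : Int) + 2 * 2
        then (((matrix.length : Int) + 2 * 2 - 0 + 2 - 1) / 2).toNat else 0)
      = (matrix.length + 2 * 2 + 1) / 2 from by split_ifs <;> omega]
  apply List.ext_getElem
  · simp [hclen]
  intro k h1 h2
  simp only [List.length_map, List.length_range] at h1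
  simp only [List.getElem_map, List.getElem_range]
  have hkc : k < canvas.length := by rwa [hclen]
  have hrowk : canvas[k] = (List.range (matrix.length + 2 * 2)).map
      (fun c => pvGet2 canvas k c) := by
    apply List.ext_getElem
    · rw [List.length_map, List.length_range, ← List.getD_eq_getElem _ ([] : List Nat) hkc]
      exact hcwid k hkc
    intro c hc1 hc2
    simp only [List.getElem_map, List.getElem_range]
    unfold pvGet2
    rw [List.getD_eq_getElem _ _ hkc, List.getD_eq_getElem _ _ hc1]
  rw [hrowk, List.map_map]
  congr 1
  rw [show matrix.length + 4 = matrix.length + 2 * 2 from by omega]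
  apply List.map_congr_left
  intro c hc
  simp only [Function.comp_apply]
  rw [hcget k c, pvMask]
  rw [show (0 : Int) + 2 * (k : Int) = ((2 * k : Nat) : Int) from by push_cast; ring]
  rw [show ((2 * k : Nat) : Int) + 1 = ((2 * k + 1 : Nat) : Int) from by push_cast; ring]
  rw [pvGlyph_mask]

-- ===== VERDICT (by name: the statement is the Claim_ definition above) =====
theorem render_terminal_spec : Claim_equal_render_terminal := by
  intro matrix _ _
  exact pv_main matrix
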